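-- pv_equiv track=rewrite | github.com/aadi-kanwar/MPINs_OneBanc | ui.py | mpin_reason_4
-- ===== SOURCE A (Python) =====
-- common_pins_4 = {
--     "0000", "1111", "2222", "3333", "4444", "5555", "6666", "7777", "8888", "9999", "0123", "1234", "2345", "3456", "4567", "5678", "6789", "9876", "8765", "7654", "6543", "5432", "4321", "3210", "0011", "1122", "2233", "3344", "4455", "5566", "6677", "7788", "8899", "9900", "1100", "2211", "3322", "4433", "5544", "6655", "7766", "8877", "9988", "0099"
-- }
--
-- def get_combinations_4(date):
--     parts = date.strip().split('-')
--     if len(parts) != 3: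
--         return set()
--
--     dd, mm, yyyy = parts
--     if not (dd.isdigit() and mm.isdigit() and yyyy.isdigit() and len(yyyy) == 4):
--         return set()
--
--     yy1 = yyyy[:2]
--     yy2 = yyyy[-2:]
--
--     return {
--         dd + mm, dd + yy1, dd + yy2,
--         mm + dd, mm + yy1, mm + yy2,
--         yy1 + dd, yy1 + mm,
--         yy2 + dd, yy2 + mm,
--         yy1 + yy2
--     }
--
-- def mpin_reason_4(pin, dob_self, dob_spouse, anniversary):
--     if pin in common_pins_4:
--         return "COMMONLY_USED"
--     dates = [dob_self, dob_spouse, anniversary]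
--     reasons = ["DEMOGRAPHIC_DOB_SELF", "DEMOGRAPHIC_DOB_SPOUSE", "DEMOGRAPHIC_ANNIVERSARY"]
--     for i in range(3):
--         if pin in get_combinations_4(dates[i]):
--             return ["DEMOGRAPHIC_DOB_SELF", "DEMOGRAPHIC_DOB_SPOUSE", "DEMOGRAPHIC_ANNIVERSARY"][i]
--     return ""
-- ===== SOURCE B (Python) =====
-- COMMON_4 = (
--     "0000", "1111", "2222", "3333", "4444", "5555", "6666", "7777", "8888", "9999",
--     "0123", "1234", "2345", "3456", "4567", "5678", "6789",
--     "9876", "8765", "7654", "6543", "5432", "4321", "3210",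
--     "0011", "1122", "2233", "3344", "4455", "5566", "6677", "7788", "8899", "9900",
--     "1100", "2211", "3322", "4433", "5544", "6655", "7766", "8877", "9988", "0099",
-- )
--
-- def _parse_date(date):
--     parts = date.strip().split('-')
--     if len(parts) == 3:
--         dd, mm, yyyy = parts
--         if dd.isdigit() and mm.isdigit() and yyyy.isdigit() and len(yyyy) == 4:
--             return dd, mm, yyyy[:2], yyyy[-2:]
--     return None
--
-- def _combos(date):
--     parsed = _parse_date(date)
--     if parsed is None:
--         return []
--     dd, mm, y1, y2 = parsed
--     return [x + y for x, y in ((dd, mm), (dd, y1), (dd, y2),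
--                                (mm, dd), (mm, y1), (mm, y2),
--                                (y1, dd), (y1, mm),
--                                (y2, dd), (y2, mm), (y1, y2))]
--
-- def mpin_reason_4(pin, dob_self, dob_spouse, anniversary):
--     if pin in COMMON_4:
--         return "COMMONLY_USED"
--     table = {}
--     for date, reason in ((anniversary, "DEMOGRAPHIC_ANNIVERSARY"),
--                          (dob_spouse, "DEMOGRAPHIC_DOB_SPOUSE"),
--                          (dob_self, "DEMOGRAPHIC_DOB_SELF")):
--         for combo in _combos(date):
--             table[combo] = reason
--     return table.get(pin, "")
-- ===== Notes on version B (the rewrite author's own statement) =====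
-- stated objective: alternative
-- what changed: Replaces A's three sequential per-date set-membership scans with its own date parser feeding a single combo-to-reason dictionary built once in reverse priority order (higher-priority dates overwrite on collision) followed by one lookup.
import Mathlib
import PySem

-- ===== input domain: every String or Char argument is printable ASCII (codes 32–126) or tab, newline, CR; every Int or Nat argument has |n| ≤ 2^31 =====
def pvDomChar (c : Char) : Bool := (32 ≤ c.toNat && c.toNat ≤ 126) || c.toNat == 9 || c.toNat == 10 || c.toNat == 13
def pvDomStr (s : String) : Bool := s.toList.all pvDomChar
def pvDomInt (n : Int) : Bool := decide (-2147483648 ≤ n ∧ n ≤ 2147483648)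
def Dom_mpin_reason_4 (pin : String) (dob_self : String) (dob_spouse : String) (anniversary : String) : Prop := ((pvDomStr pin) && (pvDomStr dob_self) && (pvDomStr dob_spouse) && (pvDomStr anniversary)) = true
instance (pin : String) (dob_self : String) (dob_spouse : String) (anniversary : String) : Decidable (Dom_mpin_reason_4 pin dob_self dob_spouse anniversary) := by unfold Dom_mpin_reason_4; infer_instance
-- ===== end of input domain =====

-- B replaces A's three sequential per-date set-membership scans by one combo→reason
-- table built once in reverse priority order (later inserts overwrite) plus a single lookup.

-- ===== PORT A =====
def common_pins_4 : PySem.Set String := PySem.Set.ofList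
  ["0000", "1111", "2222", "3333", "4444", "5555", "6666", "7777", "8888", "9999", "0123", "1234", "2345", "3456", "4567", "5678", "6789", "9876", "8765", "7654", "6543", "5432", "4321", "3210", "0011", "1122", "2233", "3344", "4455", "5566", "6677", "7788", "8899", "9900", "1100", "2211", "3322", "4433", "5544", "6655", "7766", "8877", "9988", "0099"]

def get_combinations_4 (date : String) : PySem.Set String :=
  -- split('-') with nonempty sep: Str.split? is none only for sep = "", so getD [] is exact here
  match (PySem.Str.split? (PySem.Str.strip date) "-").getD [] with
  | [dd, mm, yyyy] =>
      if !(PySem.Str.strIsdigit dd && PySem.Str.strIsdigit mm && PySem.Str.strIsdigit yyyy && (PySem.Str.len yyyy == 4)) then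
        PySem.Set.empty
      else
        let yy1 := PySem.Str.slice yyyy none (some 2)
        let yy2 := PySem.Str.slice yyyy (some (-2)) none
        PySem.Set.ofList
          [dd ++ mm, dd ++ yy1, dd ++ yy2,
           mm ++ dd, mm ++ yy1, mm ++ yy2,
           yy1 ++ dd, yy1 ++ mm,
           yy2 ++ dd, yy2 ++ mm,
           yy1 ++ yy2]
  | _ => PySem.Set.empty

-- for i in range(3): if pin in get_combinations_4(dates[i]): return reasons[i]
def mpinLoopA (pin : String) (dates : List String) : List Int → String
  | [] => ""
  | i :: rest =>
      if PySem.Set.contains (get_combinations_4 (PySem.List.pyGetD dates i "")) pin then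
        PySem.List.pyGetD ["DEMOGRAPHIC_DOB_SELF", "DEMOGRAPHIC_DOB_SPOUSE", "DEMOGRAPHIC_ANNIVERSARY"] i ""
      else mpinLoopA pin dates rest

def mpin_reason_4 (pin : String) (dob_self : String) (dob_spouse : String) (anniversary : String) : String :=
  if PySem.Set.contains common_pins_4 pin then "COMMONLY_USED"
  else
    let dates := [dob_self, dob_spouse, anniversary]
    mpinLoopA pin dates (PySem.List.pyRange 0 3 1)

-- ===== PORT B =====
-- B's own date parser: dd, mm, yy1, yy2 (or none when the date is not dd-mm-yyyy)
def parseDate4 (date : String) : Option (String × String × String × String) :=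
  match (PySem.Str.split? (PySem.Str.strip date) "-").getD [] with
  | [dd, mm, yyyy] =>
      if PySem.Str.strIsdigit dd && PySem.Str.strIsdigit mm && PySem.Str.strIsdigit yyyy && (PySem.Str.len yyyy == 4) then
        some (dd, mm, PySem.Str.slice yyyy none (some 2), PySem.Str.slice yyyy (some (-2)) none)
      else none
  | _ => none

def combos4 (date : String) : List String :=
  match parseDate4 date with
  | none => []
  | some (dd, mm, y1, y2) =>
      [(dd, mm), (dd, y1), (dd, y2),
       (mm, dd), (mm, y1), (mm, y2),
       (y1, dd), (y1, mm),
       (y2, dd), (y2, mm), (y1, y2)].map (fun p => p.1 ++ p.2)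

def commonList4 : List String :=
  ["0000", "1111", "2222", "3333", "4444", "5555", "6666", "7777", "8888", "9999", "0123", "1234", "2345", "3456", "4567", "5678", "6789", "9876", "8765", "7654", "6543", "5432", "4321", "3210", "0011", "1122", "2233", "3344", "4455", "5566", "6677", "7788", "8899", "9900", "1100", "2211", "3322", "4433", "5544", "6655", "7766", "8877", "9988", "0099"]

def mpin_reason_4_alt (pin : String) (dob_self : String) (dob_spouse : String) (anniversary : String) : String :=
  if commonList4.contains pin then "COMMONLY_USED"
  else
    let table :=
      [(anniversary, "DEMOGRAPHIC_ANNIVERSARY"),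
       (dob_spouse, "DEMOGRAPHIC_DOB_SPOUSE"),
       (dob_self, "DEMOGRAPHIC_DOB_SELF")].foldl
        (fun d p => (combos4 p.1).foldl (fun d combo => d.insert combo p.2) d)
        PySem.Dict.empty
    table.getD pin ""

-- ===== PRECONDITION & SPEC =====
def Spec_mpin_reason_4 (pin : String) (dob_self : String) (dob_spouse : String) (anniversary : String) (out : String) : Prop := out = mpin_reason_4_alt pin dob_self dob_spouse anniversary
instance (pin : String) (dob_self : String) (dob_spouse : String) (anniversary : String) (out : String) : Decidable (Spec_mpin_reason_4 pin dob_self dob_spouse anniversary out) := by unfold Spec_mpin_reason_4; infer_instance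

-- ===== CLAIM (what is proved, stated in full; the proofs are below) =====
def Claim_equal_mpin_reason_4 : Prop := ∀ (pin : String) (dob_self : String) (dob_spouse : String) (anniversary : String), Dom_mpin_reason_4 pin dob_self dob_spouse anniversary → Spec_mpin_reason_4 pin dob_self dob_spouse anniversary (mpin_reason_4 pin dob_self dob_spouse anniversary)

-- ===== LEMMAS AND PROOFS =====

-- inserting every key of ks with the same value v: lookup = "if k ∈ ks then v else old"
theorem getD_foldl_insert_const (ks : List String) (v : String) (d : PySem.Dict String String) (k : String) :
    (ks.foldl (fun d combo => d.insert combo v) d).getD k "" =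
      if k ∈ ks then v else d.getD k "" := by
  induction ks generalizing d with
  | nil => simp
  | cons x xs ih =>
      simp only [List.foldl_cons, ih, PySem.Dict.getD_insert, List.mem_cons]
      by_cases hm : k ∈ xs <;> by_cases hx : k = x <;> simp [hm, hx]

-- the two common-pin checks agree (same 44 literals; Set.ofList keeps exactly them)
theorem common_check_eq (pin : String) :
    PySem.Set.contains common_pins_4 pin = commonList4.contains pin := by
  simp [common_pins_4, commonList4, PySem.Set.contains_eq_listContains]

-- A's combination set and B's combination list hold the same strings
theorem mem_combos_eq (date : String) (pin : String) :
    PySem.Set.contains (get_combinations_4 date) pin = decide (pin ∈ combos4 date) := by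
  unfold get_combinations_4 combos4 parseDate4
  cases h : (PySem.Str.split? (PySem.Str.strip date) "-").getD [] with
  | nil => simp [PySem.Set.empty]
  | cons a t =>
    cases t with
    | nil => simp [PySem.Set.empty]
    | cons b t2 =>
      cases t2 with
      | nil => simp [PySem.Set.empty]
      | cons c t3 =>
        cases t3 with
        | nil =>
          by_cases h1 : PySem.Chars.strIsdigit a.toList = true <;>
            by_cases h2 : PySem.Chars.strIsdigit b.toList = true <;>
              by_cases h3 : PySem.Chars.strIsdigit c.toList = true <;>
                by_cases h4 : ((c.length : Int) = 4) <;>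
                  simp [PySem.Set.contains_eq_listContains, PySem.Set.empty,
                    PySem.Str.strIsdigit, PySem.Str.len, h1, h2, h3, h4]
        | cons d t4 => simp [PySem.Set.empty]

theorem mpin_reason_4_spec : Claim_equal_mpin_reason_4 := by
  intro pin dob_self dob_spouse anniversary _
  unfold Spec_mpin_reason_4 mpin_reason_4 mpin_reason_4_alt
  rw [common_check_eq]
  by_cases hc : commonList4.contains pin = true
  · simp only [hc, if_true]
  · simp only [hc, Bool.false_eq_true, if_false]
    have hr : PySem.List.pyRange 0 3 1 = ([0, 1, 2] : List Int) := by decide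
    rw [hr]
    simp only [mpinLoopA, List.foldl_cons, List.foldl_nil, getD_foldl_insert_const,
      PySem.Dict.getD_empty, mem_combos_eq, PySem.List.pyGetD, PySem.List.pyGet?,
      PySem.List.pyIdx?]
    norm_num
    by_cases h1 : pin ∈ combos4 dob_self <;>
      by_cases h2 : pin ∈ combos4 dob_spouse <;>
        by_cases h3 : pin ∈ combos4 anniversary <;>
          simp [h1, h2, h3]

-- ===== VERDICT (by name: the statement is the Claim_ definition above) =====
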